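-- pv_equiv track=rewrite | github.com/Pranov123/Crptyo_CIA_UPS | august.py | block_process
-- ===== SOURCE A (Python) =====
-- def block_process(text, key):
--     b = (len(key) % 4) + 2
--     blocks = [text[i:i+b] for i in range(0, len(text), b)]
--
--     result = ""
--     for i, block in enumerate(blocks):
--         if i % 2 == 0:
--             result += block[::-1]
--         else:
--             result += block
--
--     return result
-- ===== SOURCE B (Python) =====
-- def block_process(text, key):
--     b = (len(key) % 4) + 2
--     n = len(text)
--     out = []
--     for i in range(n):
--         q = i // b
--         if q % 2 == 0:
--             e = min((q + 1) * b, n)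
--             out.append(text[q * b + e - 1 - i])
--         else:
--             out.append(text[i])
--     return "".join(out)
-- ===== Notes on version B (the rewrite author's own statement) =====
-- stated objective: alternative
-- what changed: B builds no block list and reverses nothing: for each output position i it computes the source index in closed form (the within-block reflection q*b + min((q+1)*b, n) - 1 - i when block q = i//b is even, i itself when odd) and joins the characters picked by that index permutation.
import Mathlib
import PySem

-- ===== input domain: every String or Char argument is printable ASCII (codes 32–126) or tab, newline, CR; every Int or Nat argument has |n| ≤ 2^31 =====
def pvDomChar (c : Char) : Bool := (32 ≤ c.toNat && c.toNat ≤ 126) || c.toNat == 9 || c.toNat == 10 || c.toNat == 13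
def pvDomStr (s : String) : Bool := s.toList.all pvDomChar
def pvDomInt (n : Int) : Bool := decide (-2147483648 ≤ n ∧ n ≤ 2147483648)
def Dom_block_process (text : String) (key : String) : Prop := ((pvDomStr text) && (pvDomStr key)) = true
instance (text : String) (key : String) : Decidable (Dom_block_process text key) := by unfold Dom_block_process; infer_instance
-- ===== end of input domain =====

-- B computes, for each output position, the source index of its character in closed form (an
-- index permutation: reflection inside even blocks, identity inside odd ones) instead of
-- building a block list and concatenating reversed slices.


-- ===== PORT A =====
def block_process (text : String) (key : String) : String :=
  let b : Int := PySem.Int.mod (PySem.Str.len key) 4 + 2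
  let blocks : List String :=
    (PySem.List.pyRange 0 (PySem.Str.len text) b).map
      (fun i => PySem.Str.slice text (some i) (some (i + b)))
  (PySem.List.enumerate blocks 0).foldl
    (fun result p =>
      if p.1 % 2 == 0 then
        result ++ (PySem.Str.slice? p.2 none none (-1)).getD ""
      else
        result ++ p.2) ""

-- ===== PORT B =====
-- ''.join of the collected one-character strings is ported as String.ofList of the collected
-- characters; every index handed to text[...] is in range, so the .getD default is never used.
def block_process_alt (text : String) (key : String) : String :=
  let b : Int := PySem.Int.mod (PySem.Str.len key) 4 + 2
  let n : Int := PySem.Str.len text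
  let out : List Char :=
    (PySem.List.pyRange 0 n 1).foldl (fun acc i =>
      let q := PySem.Int.floordiv i b
      if PySem.Int.mod q 2 == 0 then
        let e := min ((q + 1) * b) n
        acc ++ [(PySem.Str.pyGet? text (q * b + e - 1 - i)).getD ' ']
      else
        acc ++ [(PySem.Str.pyGet? text i).getD ' ']) []
  String.ofList out

-- ===== PRECONDITION & SPEC =====
def Spec_block_process (text : String) (key : String) (out : String) : Prop := out = block_process_alt text key
instance (text : String) (key : String) (out : String) : Decidable (Spec_block_process text key out) := by unfold Spec_block_process; infer_instance

-- ===== CLAIM (what is proved, stated in full; the proofs are below) =====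
def Claim_equal_block_process : Prop := ∀ (text : String) (key : String), Dom_block_process text key → Spec_block_process text key (block_process text key)

-- ===== LEMMAS AND PROOFS =====

-- alternating reverse/keep concatenation of a list of blocks
def pvAltRev (even : Bool) : List (List Char) → List Char
  | [] => []
  | x :: xs => (if even then x.reverse else x) ++ pvAltRev (!even) xs

-- the chunks of cs of size β (last one possibly shorter)
def pvChunks (β : Nat) (cs : List Char) : List (List Char) :=
  if h : cs = [] ∨ β = 0 then [] else cs.take β :: pvChunks β (cs.drop β)
  termination_by cs.length
  decreasing_by
    have h1 : cs ≠ [] := fun e => h (Or.inl e)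
    have h2 : β ≠ 0 := fun e => h (Or.inr e)
    have : 0 < cs.length := List.length_pos_iff.mpr h1
    simp [List.length_drop]; omega

lemma pvRange_nil {a b s : Int} (hs : 0 < s) (hab : b ≤ a) :
    PySem.List.pyRange a b s = [] := by
  rw [PySem.List.pyRange_of_pos _ _ hs, if_neg (by omega)]
  simp

-- cons form of a positive-step pyRange
lemma pvRange_cons {a b s : Int} (hs : 0 < s) (hab : a < b) :
    PySem.List.pyRange a b s = a :: PySem.List.pyRange (a + s) b s := by
  rw [PySem.List.pyRange_of_pos _ _ hs, PySem.List.pyRange_of_pos _ _ hs, if_pos hab]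
  by_cases h2 : a + s < b
  · rw [if_pos h2]
    have hdiv : (b - a + s - 1) / s = (b - (a + s) + s - 1) / s + 1 := by
      rw [show b - a + s - 1 = (b - (a + s) + s - 1) + 1 * s by ring,
          Int.add_mul_ediv_right _ _ (by omega)]
    have hnn : 0 ≤ (b - (a + s) + s - 1) / s :=
      Int.ediv_nonneg (by omega) (by omega)
    have htn : ((b - (a + s) + s - 1) / s + 1).toNat = ((b - (a + s) + s - 1) / s).toNat + 1 := by
      omega
    rw [hdiv, htn, List.range_succ_eq_map]
    simp only [List.map_cons, List.map_map]
    congr 1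
    · simp
    · apply List.map_congr_left
      intro k _
      simp only [Function.comp]
      push_cast
      ring
  · rw [if_neg h2]
    have h1 : (b - a + s - 1) / s = 1 := by
      rw [show b - a + s - 1 = (b - a - 1) + 1 * s by ring,
          Int.add_mul_ediv_right _ _ (by omega),
          Int.ediv_eq_zero_of_lt (by omega) (by omega)]
      norm_num
    rw [h1]
    norm_num

-- shift a positive-step pyRange
lemma pvRange_shift (a b c s : Int) (hs : 0 < s) :
    PySem.List.pyRange (a + c) (b + c) s = (PySem.List.pyRange a b s).map (· + c) := by
  rw [PySem.List.pyRange_of_pos _ _ hs, PySem.List.pyRange_of_pos _ _ hs]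
  have he : b + c - (a + c) = b - a := by ring
  rw [he]
  have hn : (if a + c < b + c then ((b - a + s - 1) / s).toNat else 0)
      = (if a < b then ((b - a + s - 1) / s).toNat else 0) := by
    by_cases hab : a < b
    · rw [if_pos (by omega), if_pos hab]
    · rw [if_neg (by omega), if_neg hab]
  rw [hn, List.map_map]
  apply List.map_congr_left
  intro k _
  simp only [Function.comp]
  ring

-- every element of a pyRange from 0 with positive step is nonnegative
lemma pvRange_mem_nonneg {b s : Int} (hs : 0 < s) {x : Int}
    (hx : x ∈ PySem.List.pyRange 0 b s) : 0 ≤ x := by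
  rw [PySem.List.pyRange_of_pos _ _ hs] at hx
  simp at hx
  obtain ⟨k, _, rfl⟩ := hx
  have : (0 : Int) ≤ s * k := mul_nonneg hs.le (Int.natCast_nonneg k)
  omega

-- slicing at indices shifted by c is slicing the dropped list
lemma pvSlice_drop_shift (cs : List Char) (c : Nat) (i j : Int) (hi : 0 ≤ i) (hj : 0 ≤ j) :
    PySem.List.slice cs (some (i + (c : Int))) (some (j + (c : Int)))
      = PySem.List.slice (cs.drop c) (some i) (some j) := by
  rw [PySem.List.slice_toNat cs (a := i + (c : Int)) (b := j + (c : Int)) (by omega) (by omega),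
      PySem.List.slice_toNat (cs.drop c) hi hj, List.drop_drop]
  congr 1
  · omega
  · congr 1
    omega

-- a nat-bounded slice is drop-take
lemma pvSlice_nat (cs : List Char) (j β : Nat) :
    PySem.List.slice cs (some (j : Int)) (some ((j : Int) + (β : Int)))
      = (cs.drop j).take β := by
  rw [PySem.List.slice_toNat cs (a := (j : Int)) (b := (j : Int) + (β : Int)) (by omega) (by omega)]
  congr 1
  omega

-- A's comprehension produces exactly the chunks
lemma pvBlocks_aux (β : Nat) (hβ : 0 < β) :
    ∀ (fuel : Nat) (cs : List Char), cs.length ≤ fuel →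
      (PySem.List.pyRange 0 (cs.length : Int) (β : Int)).map
        (fun i => PySem.List.slice cs (some i) (some (i + (β : Int)))) = pvChunks β cs := by
  have hβ' : (0 : Int) < (β : Int) := by exact_mod_cast hβ
  intro fuel
  induction fuel with
  | zero =>
    intro cs h
    have hcs : cs = [] := List.eq_nil_of_length_eq_zero (by omega)
    subst hcs
    rw [pvChunks, dif_pos (Or.inl rfl)]
    simp only [List.length_nil, Nat.cast_zero]
    rw [pvRange_nil hβ' (le_refl 0)]
    simp
  | succ m ih =>
    intro cs h
    by_cases hnil : cs = []
    · subst hnil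
      rw [pvChunks, dif_pos (Or.inl rfl)]
      simp only [List.length_nil, Nat.cast_zero]
      rw [pvRange_nil hβ' (le_refl 0)]
      simp
    · have hlen : 0 < cs.length := List.length_pos_iff.mpr hnil
      rw [pvRange_cons hβ' (by exact_mod_cast hlen), List.map_cons]
      have hhead : PySem.List.slice cs (some (0 : Int)) (some ((0 : Int) + (β : Int)))
          = cs.take β := by
        simpa using pvSlice_nat cs 0 β
      have htail :
          (PySem.List.pyRange (0 + (β : Int)) ((cs.length : Int)) (β : Int)).map
            (fun i => PySem.List.slice cs (some i) (some (i + (β : Int)))) = pvChunks β (cs.drop β) := by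
        by_cases hb : β ≤ cs.length
        · have hshift : PySem.List.pyRange (0 + (β : Int)) ((cs.length : Int)) (β : Int)
              = (PySem.List.pyRange 0 (((cs.drop β).length : Int)) (β : Int)).map (· + (β : Int)) := by
            rw [show ((cs.length : Int)) = ((cs.drop β).length : Int) + (β : Int) by
                  simp [List.length_drop]; omega,
                pvRange_shift _ _ _ _ hβ']
          rw [hshift, List.map_map,
              ← ih (cs.drop β) (by simp [List.length_drop]; omega)]
          apply List.map_congr_left
          intro i hi
          have hnn : 0 ≤ i := pvRange_mem_nonneg hβ' hi
          simp only [Function.comp]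
          rw [show i + (β : Int) + (β : Int) = (i + (β : Int)) + (β : Int) by ring]
          exact pvSlice_drop_shift cs β i (i + (β : Int)) hnn (by omega)
        · have hdrop : cs.drop β = [] := List.drop_eq_nil_of_le (by omega)
          rw [hdrop, pvChunks, dif_pos (Or.inl rfl)]
          rw [pvRange_nil hβ' (by push_cast; omega)]
          simp
      rw [hhead, htail]
      conv_rhs => rw [pvChunks]
      rw [dif_neg (show ¬(cs = [] ∨ β = 0) by push_neg; exact ⟨hnil, by omega⟩)]

-- A's enumerate fold is pvAltRev
lemma pvEnumFold (blocks : List String) :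
    ∀ (s : Int) (acc : String), 0 ≤ s →
    ((PySem.List.enumerate blocks s).foldl
      (fun result p =>
        if p.1 % 2 == 0 then
          result ++ (PySem.Str.slice? p.2 none none (-1)).getD ""
        else
          result ++ p.2) acc).toList
      = acc.toList ++ pvAltRev (s % 2 == 0) (blocks.map String.toList) := by
  induction blocks with
  | nil =>
    intro s acc _
    simp [PySem.List.enumerate, pvAltRev]
  | cons x xs ih =>
    intro s acc hs
    rw [PySem.List.enumerate_cons, List.foldl_cons]
    rw [ih (s + 1) _ (by omega)]
    have hpar : ((s + 1) % 2 == 0) = !(s % 2 == 0) := by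
      by_cases h : s % 2 = 0
      · have h1 : (s + 1) % 2 = 1 := by omega
        simp [h, h1]
      · have h0 : s % 2 = 1 := by omega
        have h1 : (s + 1) % 2 = 0 := by omega
        simp [h0, h1]
    rw [hpar]
    by_cases h : s % 2 = 0
    · simp [h, pvAltRev, PySem.Str.slice?_none_none_neg_one]
    · have h0 : s % 2 = 1 := by omega
      simp [h0, pvAltRev]

-- the odd step of the alternation
lemma pvAltRev_step (β : Nat) (hβ : 0 < β) (ds : List Char) :
    pvAltRev false (pvChunks β ds) = ds.take β ++ pvAltRev true (pvChunks β (ds.drop β)) := by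
  by_cases h : ds = []
  · subst h
    rw [pvChunks, dif_pos (Or.inl rfl)]
    simp [pvAltRev, pvChunks]
  · rw [pvChunks, dif_neg (show ¬(ds = [] ∨ β = 0) by push_neg; exact ⟨h, by omega⟩)]
    simp [pvAltRev]

-- A's result, on the character-list level
lemma pvASide (text key : String) :
    (block_process text key).toList
      = pvAltRev true (pvChunks (key.toList.length % 4 + 2) text.toList) := by
  have hβ : 0 < key.toList.length % 4 + 2 := by omega
  have hb : PySem.Int.mod ((key.toList.length : Int)) 4 + 2
      = ((key.toList.length % 4 + 2 : Nat) : Int) := by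
    simp
  simp only [block_process, PySem.Str.len_eq, hb]
  rw [pvEnumFold _ 0 "" (le_refl 0)]
  simp only [List.map_map, Function.comp_def, PySem.Str.toList_slice,
    PySem.Chars.slice_eq_listSlice]
  rw [pvBlocks_aux _ hβ text.toList.length text.toList (le_refl _)]
  simp
-- B's per-position source lookup, in Nat form
def pvG (cs : List Char) (β k : Nat) : Char :=
  if (k / β) % 2 = 0 then
    cs.getD ((k / β) * β + min ((k / β + 1) * β) cs.length - 1 - k) ' '
  else
    cs.getD k ' '

lemma pvGetD_eq (cs : List Char) (j : Nat) (h : j < cs.length) : cs.getD j ' ' = cs[j] := by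
  simp [List.getD_eq_getElem?_getD, List.getElem?_eq_getElem h]

-- the even-block piece: reading indices min β n - 1 - k is the reversed first chunk
lemma pvRevPiece (cs : List Char) (β : Nat) :
    (List.range (min β cs.length)).map (fun k => cs.getD (min β cs.length - 1 - k) ' ')
      = (cs.take β).reverse := by
  apply List.ext_getElem
  · simp
  intro k h1 h2
  simp only [List.length_map, List.length_range] at h1
  simp only [List.getElem_map, List.getElem_range, List.getElem_reverse, List.getElem_take]
  rw [pvGetD_eq cs _ (by omega)]
  simp only [List.length_take]

-- the odd-block piece: reading indices β + k is the second chunk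
lemma pvMidPiece (cs : List Char) (β : Nat) (h : β ≤ cs.length) :
    (List.range (min (2 * β) cs.length - β)).map (fun k => cs.getD (β + k) ' ')
      = (cs.drop β).take β := by
  apply List.ext_getElem
  · simp only [List.length_map, List.length_range, List.length_take, List.length_drop]
    omega
  intro k h1 h2
  simp only [List.length_map, List.length_range] at h1
  simp only [List.getElem_map, List.getElem_range, List.getElem_take, List.getElem_drop]
  rw [pvGetD_eq cs _ (by omega)]

-- the tail piece: pvG at indices 2β + k is pvG of the list with the first two chunks dropped
lemma pvGShift (cs : List Char) (β k : Nat) (hβ : 0 < β) (hk : k < cs.length - 2 * β) :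
    pvG cs β (2 * β + k) = pvG (cs.drop (2 * β)) β k := by
  have hq : (2 * β + k) / β = k / β + 2 := by
    rw [show 2 * β + k = k + β * 2 by ring, Nat.add_mul_div_left _ _ hβ]
  have hlo : (k / β) * β ≤ k := Nat.div_mul_le_self k β
  have hhi : k < (k / β + 1) * β := (Nat.div_lt_iff_lt_mul hβ).mp (Nat.lt_succ_self _)
  have hlen : (cs.drop (2 * β)).length = cs.length - 2 * β := by simp
  unfold pvG
  rw [hq, Nat.add_mod_right, hlen]
  split_ifs with hpar
  · -- even block: the two reflected indices address the same character
    have e1 : (k / β + 2) * β = k / β * β + 2 * β := by ring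
    have e2 : (k / β + 2 + 1) * β = k / β * β + β + 2 * β := by ring
    have e3 : (k / β + 1) * β = k / β * β + β := by ring
    rw [e1, e2, e3]
    rw [List.getD_eq_getElem?_getD, List.getD_eq_getElem?_getD, List.getElem?_drop]
    congr 2
    omega
  · rw [List.getD_eq_getElem?_getD, List.getD_eq_getElem?_getD, List.getElem?_drop]

-- main B lemma: the index-permutation read-out is the alternating reverse/keep concatenation
lemma pvBnat (β : Nat) (hβ : 0 < β) :
    ∀ (fuel : Nat) (cs : List Char), cs.length ≤ fuel →
      (List.range cs.length).map (pvG cs β) = pvAltRev true (pvChunks β cs) := by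
  intro fuel
  induction fuel with
  | zero =>
    intro cs h
    have hcs : cs = [] := List.eq_nil_of_length_eq_zero (by omega)
    subst hcs
    rw [pvChunks, dif_pos (Or.inl rfl)]
    simp [pvAltRev]
  | succ m ih =>
    intro cs h
    by_cases hnil : cs = []
    · subst hnil
      rw [pvChunks, dif_pos (Or.inl rfl)]
      simp [pvAltRev]
    · have hlen : 0 < cs.length := List.length_pos_iff.mpr hnil
      -- split the index range at the first two chunk boundaries
      have hsplit : List.range cs.length
          = List.range (min β cs.length)
            ++ ((List.range (min (2 * β) cs.length - min β cs.length)).map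
                  (fun k => min β cs.length + k)
            ++ (List.range (cs.length - min (2 * β) cs.length)).map
                  (fun k => min (2 * β) cs.length + k)) := by
        have B : List.range (min (2 * β) cs.length)
            = List.range (min β cs.length)
              ++ (List.range (min (2 * β) cs.length - min β cs.length)).map
                  (fun k => min β cs.length + k) := by
          conv_lhs => rw [show min (2 * β) cs.length
              = min β cs.length + (min (2 * β) cs.length - min β cs.length) by omega]
          exact List.range_add
        conv_lhs => rw [show cs.length
            = min (2 * β) cs.length + (cs.length - min (2 * β) cs.length) by omega]
        rw [List.range_add, B, List.append_assoc]
      rw [hsplit, List.map_append, List.map_append, List.map_map, List.map_map]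
      -- piece 1: the first (even) chunk, reversed
      have hp1 : (List.range (min β cs.length)).map (pvG cs β) = (cs.take β).reverse := by
        rw [← pvRevPiece cs β]
        apply List.map_congr_left
        intro k hk
        have hk' : k < min β cs.length := List.mem_range.mp hk
        unfold pvG
        rw [Nat.div_eq_of_lt (by omega)]
        simp
      -- piece 2: the second (odd) chunk, unchanged
      have hp2 : (List.range (min (2 * β) cs.length - min β cs.length)).map
            (pvG cs β ∘ fun k => min β cs.length + k)
          = (cs.drop β).take β := by
        by_cases hb0 : β ≤ cs.length
        · have he1 : min β cs.length = β := by omega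
          rw [he1, ← pvMidPiece cs β hb0]
          apply List.map_congr_left
          intro k hk
          have hk' : k < min (2 * β) cs.length - β := List.mem_range.mp hk
          simp only [Function.comp]
          unfold pvG
          have hq : (β + k) / β = 1 := by
            rw [show β + k = k + β * 1 by ring, Nat.add_mul_div_left _ _ hβ,
                Nat.div_eq_of_lt (show k < β by omega)]
          rw [hq]
          simp
        · have h0 : min (2 * β) cs.length - min β cs.length = 0 := by omega
          have hd : cs.drop β = [] := List.drop_eq_nil_of_le (by omega)
          rw [h0, hd]
          simp
      -- piece 3: everything past the first two chunks, by induction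
      have hp3 : (List.range (cs.length - min (2 * β) cs.length)).map
            (pvG cs β ∘ fun k => min (2 * β) cs.length + k)
          = pvAltRev true (pvChunks β (cs.drop (β + β))) := by
        by_cases hb2 : 2 * β ≤ cs.length
        · have he2 : min (2 * β) cs.length = 2 * β := by omega
          have hdd : cs.drop (β + β) = cs.drop (2 * β) := by
            rw [show β + β = 2 * β by ring]
          rw [he2, hdd, ← ih (cs.drop (2 * β)) (by rw [List.length_drop]; omega)]
          rw [List.length_drop]
          apply List.map_congr_left
          intro k hk
          have hk' : k < cs.length - 2 * β := List.mem_range.mp hk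
          simp only [Function.comp]
          exact pvGShift cs β k hβ hk'
        · have h0 : cs.length - min (2 * β) cs.length = 0 := by omega
          have hd : cs.drop (β + β) = [] := List.drop_eq_nil_of_le (by omega)
          rw [h0, hd, pvChunks, dif_pos (Or.inl rfl)]
          simp [pvAltRev]
      rw [hp1, hp2, hp3]
      -- the alternation, unfolded through the first two chunks
      conv_rhs => rw [pvChunks]
      rw [dif_neg (show ¬(cs = [] ∨ β = 0) by push_neg; exact ⟨hnil, by omega⟩)]
      simp only [pvAltRev, if_true, Bool.not_true]
      rw [pvAltRev_step β hβ (cs.drop β), List.drop_drop]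

-- B's loop body appends one character either way
lemma pvFoldIf {α γ : Type} (c : α → Bool) (f g : α → γ) (l : List α) (acc : List γ) :
    l.foldl (fun acc x => if c x then acc ++ [f x] else acc ++ [g x]) acc
      = acc ++ l.map (fun x => if c x then f x else g x) := by
  have hfun : (fun (acc : List γ) x => if c x then acc ++ [f x] else acc ++ [g x])
      = fun acc x => acc ++ [if c x then f x else g x] := by
    funext a x
    split <;> rfl
  rw [hfun, PySem.List.foldl_append_singleton_eq_map]

-- B's Int-level loop body, at a Nat index, is pvG
lemma pvElemEq (cs : List Char) (β k : Nat) (hβ : 0 < β) (hk : k < cs.length) :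
    (if PySem.Int.mod (PySem.Int.floordiv ((k : Nat) : Int) ((β : Nat) : Int)) 2 == 0 then
      (PySem.List.pyGet? cs (PySem.Int.floordiv ((k : Nat) : Int) ((β : Nat) : Int) * ((β : Nat) : Int)
        + min ((PySem.Int.floordiv ((k : Nat) : Int) ((β : Nat) : Int) + 1) * ((β : Nat) : Int)) ((cs.length : Nat) : Int)
        - 1 - ((k : Nat) : Int))).getD ' '
    else (PySem.List.pyGet? cs ((k : Nat) : Int)).getD ' ') = pvG cs β k := by
  have hlo : (k / β) * β ≤ k := Nat.div_mul_le_self k β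
  have hhi : k < (k / β + 1) * β := (Nat.div_lt_iff_lt_mul hβ).mp (Nat.lt_succ_self _)
  rw [PySem.Int.floordiv_natCast]
  unfold pvG
  by_cases hpar : (k / β) % 2 = 0
  · have hbe : (PySem.Int.mod ((k / β : Nat) : Int) 2 == 0) = true := by
      rw [show ((2 : Int)) = ((2 : Nat) : Int) by norm_num, PySem.Int.mod_natCast]
      simp [hpar]
    rw [hbe, if_pos rfl, if_pos hpar]
    have hidx : (((k / β : Nat) : Int)) * ((β : Nat) : Int)
        + min ((((k / β : Nat) : Int) + 1) * ((β : Nat) : Int)) ((cs.length : Nat) : Int)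
        - 1 - ((k : Nat) : Int)
        = (((k / β) * β + min ((k / β + 1) * β) cs.length - 1 - k : Nat) : Int) := by
      have c1 : (((k / β : Nat) : Int)) * ((β : Nat) : Int) = (((k / β) * β : Nat) : Int) := by
        push_cast; ring
      have c2 : ((((k / β : Nat) : Int)) + 1) * ((β : Nat) : Int) = (((k / β + 1) * β : Nat) : Int) := by
        push_cast; ring
      rw [c1, c2]
      have key : ∀ (A B n' : Nat), A ≤ k → k < B → k < n' →
          ((A : Int) + min ((B : Nat) : Int) ((n' : Nat) : Int) - 1 - ((k : Nat) : Int)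
            = ((A + min B n' - 1 - k : Nat) : Int)) := by
        intro A B n' h1 h2 h3
        omega
      exact key _ _ _ hlo hhi hk
    rw [hidx, PySem.List.pyGet?_natCast, List.getD_eq_getElem?_getD]
  · have hbe : (PySem.Int.mod ((k / β : Nat) : Int) 2 == 0) = false := by
      rw [show ((2 : Int)) = ((2 : Nat) : Int) by norm_num, PySem.Int.mod_natCast]
      simp
      omega
    rw [hbe]
    simp only [Bool.false_eq_true, if_false, if_neg hpar]
    rw [PySem.List.pyGet?_natCast, List.getD_eq_getElem?_getD]

-- B's result, on the character-list level
lemma pvBSide (text key : String) :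
    (block_process_alt text key).toList
      = (List.range text.toList.length).map (pvG text.toList (key.toList.length % 4 + 2)) := by
  have hβ : 0 < key.toList.length % 4 + 2 := by omega
  have hb : PySem.Int.mod ((key.toList.length : Int)) 4 + 2
      = ((key.toList.length % 4 + 2 : Nat) : Int) := by
    simp
  simp only [block_process_alt, PySem.Str.len_eq, hb, PySem.Str.pyGet?_eq,
    PySem.Chars.pyGet?_eq_listPyGet?, String.toList_ofList]
  rw [pvFoldIf, List.nil_append, PySem.List.pyRange_zero_nat, List.map_map]
  apply List.map_congr_left
  intro k hk
  have hk' : k < text.toList.length := List.mem_range.mp hk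
  simp only [Function.comp]
  exact pvElemEq text.toList (key.toList.length % 4 + 2) k hβ hk'

-- ===== VERDICT (by name: the statement is the Claim_ definition above) =====
theorem block_process_spec : Claim_equal_block_process := by
  intro text key _
  unfold Spec_block_process
  have hβ : 0 < key.toList.length % 4 + 2 := by omega
  apply String.toList_inj.mp
  rw [pvASide, pvBSide, pvBnat _ hβ text.toList.length text.toList (le_refl _)]
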